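-- pv_equiv track=rewrite | github.com/chrisrogers37/shuffify | shuffify/shuffle_algorithms/utils.py | reassemble_with_locks
-- ===== SOURCE A (Python) =====
-- from typing import List, Dict, Any, Tuple
--
-- def reassemble_with_locks(
--     shuffled_uris: List[str],
--     locked_positions: Dict[int, str],
--     total_length: int,
-- ) -> List[str]:
--     """
--     Reassemble a full URI list by placing locked tracks at their
--     positions and filling remaining slots with shuffled URIs.
--
--     Args:
--         shuffled_uris: URIs from the shuffle algorithm (unlocked only).
--         locked_positions: Dict of {position: uri} for locked tracks.
--         total_length: Total number of tracks in the playlist.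
--
--     Returns:
--         Complete URI list with locks in place.
--     """
--     if not locked_positions:
--         return shuffled_uris
--
--     result = [None] * total_length
--
--     for pos, uri in locked_positions.items():
--         pos = int(pos)
--         if 0 <= pos < total_length:
--             result[pos] = uri
--
--     unlocked_idx = 0
--     for i in range(total_length):
--         if result[i] is None:
--             if unlocked_idx < len(shuffled_uris):
--                 result[i] = shuffled_uris[unlocked_idx]
--                 unlocked_idx += 1
--
--     return [u for u in result if u is not None]
-- ===== SOURCE B (Python) =====
-- from typing import List, Dict
--
-- def reassemble_with_locks(
--     shuffled_uris: List[str],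
--     locked_positions: Dict[int, str],
--     total_length: int,
-- ) -> List[str]:
--     if not locked_positions:
--         return shuffled_uris
--
--     n = max(total_length, 0)
--
--     locks = {}
--     for pos, uri in locked_positions.items():
--         pos = int(pos)
--         if 0 <= pos < n:
--             locks[pos] = uri
--
--     # Slice-and-concatenate: between consecutive locks (in position order) the
--     # output is a contiguous run of shuffled URIs; lock number j sitting at
--     # position p is preceded by exactly p - j fillers, so the run before it is
--     # shuffled_uris[prev : p - j] (Python slicing clamps when fillers run out).
--     out = []
--     prev = 0
--     for j, p in enumerate(sorted(locks)):
--         out += shuffled_uris[prev:p - j]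
--         out.append(locks[p])
--         prev = p - j
--     out += shuffled_uris[prev:n - len(locks)]
--     return out
-- ===== Notes on version B (the rewrite author's own statement) =====
-- stated objective: alternative
-- what changed: Replaces A's scatter-into-a-None-sentinel-array, per-index fill pass over range(total_length) and final filtering compaction by a slice-and-concatenate scheme: the valid locks are sorted by position and the output is assembled as contiguous slices of shuffled_uris (lock j at position p is preceded by exactly p-j fillers) interleaved with the lock values, relying on Python slice clamping instead of an exhaustion check.
import Mathlib
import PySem

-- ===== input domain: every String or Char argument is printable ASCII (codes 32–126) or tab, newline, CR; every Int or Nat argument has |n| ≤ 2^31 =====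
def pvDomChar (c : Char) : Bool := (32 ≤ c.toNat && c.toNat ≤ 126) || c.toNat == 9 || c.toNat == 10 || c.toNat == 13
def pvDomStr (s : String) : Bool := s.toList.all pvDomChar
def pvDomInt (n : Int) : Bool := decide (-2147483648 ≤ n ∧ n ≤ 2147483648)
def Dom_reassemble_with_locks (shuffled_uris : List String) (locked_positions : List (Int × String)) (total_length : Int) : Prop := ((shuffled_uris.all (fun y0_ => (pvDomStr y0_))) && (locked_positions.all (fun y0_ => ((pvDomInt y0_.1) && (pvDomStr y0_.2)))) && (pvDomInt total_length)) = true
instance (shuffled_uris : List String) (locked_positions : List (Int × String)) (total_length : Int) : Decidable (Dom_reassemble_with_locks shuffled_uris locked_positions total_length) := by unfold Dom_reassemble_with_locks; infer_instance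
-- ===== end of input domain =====

-- B replaces A's None-sentinel scatter array, per-index fill pass and final compaction by
-- sorting the valid lock positions and concatenating slices of shuffled_uris between the
-- lock values (objective: alternative).

-- ===== PORT A =====
-- Python's result list is mutated in place; Array models that O(1) mutation exactly.
-- for pos, uri in locked_positions.items(): if 0 <= pos < total_length: result[pos] = uri
def pvLockLoopA : List (Int × String) → Array (Option String) → Int → Array (Option String)
  | [], res, _ => res
  | (pos, uri) :: rest, res, total =>
      if 0 ≤ pos ∧ pos < total then pvLockLoopA rest (res.setIfInBounds pos.toNat (some uri)) total
      else pvLockLoopA rest res total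

-- for i in range(total_length): if result[i] is None and unlocked_idx < len(shuffled_uris): fill;
-- result[i] reads via res[i.toNat]?, exact here since every i satisfies 0 ≤ i < len(result)
def pvFillLoopA : List Int → Array (Option String) → List String → Int → Array (Option String)
  | [], res, _, _ => res
  | i :: rest, res, s, idx =>
      match res[i.toNat]? with
      | some none =>
          if idx < (s.length : Int) then
            pvFillLoopA rest (res.setIfInBounds i.toNat (PySem.List.pyGet? s idx)) s (idx + 1)
          else pvFillLoopA rest res s idx
      | _ => pvFillLoopA rest res s idx

def reassemble_with_locks (shuffled_uris : List String) (locked_positions : List (Int × String)) (total_length : Int) : List String :=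
  if locked_positions = [] then shuffled_uris
  else
    ((pvFillLoopA (PySem.List.pyRange 0 total_length 1)
        (pvLockLoopA locked_positions (Array.replicate total_length.toNat (none : Option String)) total_length)
        shuffled_uris 0).toList).filterMap id

-- ===== PORT B =====
-- locks = {}; for pos, uri in locked_positions.items(): if 0 <= pos < n: locks[pos] = uri
def pvBuildLocksB (locked_positions : List (Int × String)) (n : Int) : PySem.Dict Int String :=
  locked_positions.foldl
    (fun d p => if 0 ≤ p.1 ∧ p.1 < n then d.insert p.1 p.2 else d)
    PySem.Dict.empty

-- for j, p in enumerate(sorted(locks)): out += shuffled_uris[prev:p-j]; out.append(locks[p]); prev = p-j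
-- locks[p] is (locks.get? p).getD "" — exact here: p is drawn from sorted(locks), so p is a key.
def pvSegLoopB (s : List String) (locks : PySem.Dict Int String) :
    List Int → Int → Int → List String → List String × Int
  | [], _, prev, out => (out, prev)
  | p :: rest, j, prev, out =>
      pvSegLoopB s locks rest (j + 1) (p - j)
        (out ++ PySem.List.slice s (some prev) (some (p - j)) ++ [(locks.get? p).getD ""])

def reassemble_with_locks_alt (shuffled_uris : List String) (locked_positions : List (Int × String)) (total_length : Int) : List String :=
  if locked_positions = [] then shuffled_uris
  else
    let n := max total_length 0
    let locks := pvBuildLocksB locked_positions n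
    let st := pvSegLoopB shuffled_uris locks
        (PySem.List.sorted locks.keys (fun x => x) false) 0 0 []
    st.1 ++ PySem.List.slice shuffled_uris (some st.2) (some (n - (locks.keys.length : Int)))

-- ===== PRECONDITION & SPEC =====
def Spec_reassemble_with_locks (shuffled_uris : List String) (locked_positions : List (Int × String)) (total_length : Int) (out : List String) : Prop := out = reassemble_with_locks_alt shuffled_uris locked_positions total_length
instance (shuffled_uris : List String) (locked_positions : List (Int × String)) (total_length : Int) (out : List String) : Decidable (Spec_reassemble_with_locks shuffled_uris locked_positions total_length out) := by unfold Spec_reassemble_with_locks; infer_instance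

-- ===== CLAIM (what is proved, stated in full; the proofs are below) =====
def Claim_equal_reassemble_with_locks : Prop := ∀ (shuffled_uris : List String) (locked_positions : List (Int × String)) (total_length : Int), Dom_reassemble_with_locks shuffled_uris locked_positions total_length → Spec_reassemble_with_locks shuffled_uris locked_positions total_length (reassemble_with_locks shuffled_uris locked_positions total_length)

-- ===== LEMMAS AND PROOFS =====

-- merge of an option row with fillers: the common normal form of both programs' cores
def pvMrg : List (Option String) → List String → List String
  | [], _ => []
  | some u :: r, rem => u :: pvMrg r rem
  | none :: r, [] => pvMrg r []
  | none :: r, x :: xs => x :: pvMrg r xs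

-- A's fill pass as a structural recursion result (still carrying the None slots)
def pvFillR : List (Option String) → List String → List (Option String)
  | [], _ => []
  | some u :: r, rem => some u :: pvFillR r rem
  | none :: r, [] => none :: pvFillR r []
  | none :: r, x :: xs => some x :: pvFillR r xs

lemma pvSet_append_length (pre : List (Option String)) (y v : Option String) (r : List (Option String)) :
    (pre ++ y :: r).set pre.length v = pre ++ v :: r := by
  induction pre with
  | nil => rfl
  | cons a t ih => simp [ih]

lemma pvGet_append_length (pre : List (Option String)) (y : Option String) (r : List (Option String)) :
    (pre ++ y :: r)[pre.length]? = some y := by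
  induction pre with
  | nil => rfl
  | cons a t ih => simp

lemma pvFillLoopA_spec (s : List String) :
    ∀ (post pre : List (Option String)) (res : Array (Option String)) (idx : Nat),
      res.toList = pre ++ post →
      (pvFillLoopA (PySem.List.pyRange (pre.length : Int) ((pre.length : Int) + (post.length : Int)) 1)
          res s (idx : Int)).toList
        = pre ++ pvFillR post (s.drop idx) := by
  intro post
  induction post with
  | nil =>
      intro pre res idx hres
      rw [PySem.List.pyRange_one_eq_nil (by simp)]
      simpa [pvFillLoopA, pvFillR] using hres
  | cons y r ih =>
      intro pre res idx hres
      rw [PySem.List.pyRange_one_cons (by push_cast [List.length_cons]; omega)]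
      have e : (pre.length : Int) + ((y :: r).length : Int)
          = ((pre.length : Int) + 1) + (r.length : Int) := by
        push_cast [List.length_cons]; ring
      rw [e]
      have hget : res[((pre.length : Int)).toNat]? = some y := by
        rw [Int.toNat_natCast, ← Array.getElem?_toList, hres]
        exact pvGet_append_length pre y r
      have hih : ∀ (w : Option String) (res' : Array (Option String)) (j : Nat),
          res'.toList = pre ++ w :: r →
          (pvFillLoopA (PySem.List.pyRange ((pre.length : Int) + 1) (((pre.length : Int) + 1) + (r.length : Int)) 1)
              res' s (j : Int)).toList
            = pre ++ w :: pvFillR r (s.drop j) := by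
        intro w res' j h'
        have h := ih (pre ++ [w]) res' j (by simpa [List.append_assoc] using h')
        simp only [List.length_append, List.length_cons, List.length_nil, Nat.cast_add,
          Nat.cast_one, List.append_assoc, List.singleton_append] at h
        exact h
      cases y with
      | some u =>
          simp only [pvFillLoopA, hget]
          rw [pvFillR]
          exact hih (some u) res idx hres
      | none =>
          simp only [pvFillLoopA, hget]
          by_cases hidx : idx < s.length
          · have hc : (idx : Int) < (s.length : Int) := by exact_mod_cast hidx
            rw [if_pos hc]
            have hsome : PySem.List.pyGet? s (idx : Int) = some s[idx] := by
              rw [PySem.List.pyGet?_natCast]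
              exact List.getElem?_eq_getElem hidx
            have h' : (res.setIfInBounds ((pre.length : Int)).toNat (PySem.List.pyGet? s (idx : Int))).toList
                = pre ++ some s[idx] :: r := by
              rw [Array.toList_setIfInBounds, Int.toNat_natCast, hres, hsome]
              exact pvSet_append_length pre none (some s[idx]) r
            have hdrop : s.drop idx = s[idx] :: s.drop (idx + 1) :=
              List.drop_eq_getElem_cons hidx
            rw [hdrop, pvFillR]
            rw [show ((idx : Nat) : Int) + 1 = (((idx + 1 : Nat)) : Int) by push_cast; ring]
            exact hih (some s[idx]) _ (idx + 1) h'
          · have hc : ¬ ((idx : Int) < (s.length : Int)) := by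
              intro h; exact hidx (by exact_mod_cast h)
            rw [if_neg hc]
            have hdrop : s.drop idx = [] := List.drop_eq_nil_of_le (by omega)
            rw [hdrop, pvFillR, ← hdrop]
            exact hih none res idx hres

lemma pvFilterMap_fillR (r : List (Option String)) :
    ∀ rem : List String, (pvFillR r rem).filterMap id = pvMrg r rem := by
  induction r with
  | nil => intro rem; simp [pvFillR, pvMrg]
  | cons y t ih =>
      intro rem
      cases y with
      | some u =>
          rw [pvFillR, pvMrg, List.filterMap_cons_some (show id (some _) = some _ from rfl), ih]
      | none =>
          cases rem with
          | nil => rw [pvFillR, pvMrg, List.filterMap_cons_none rfl, ih]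
          | cons x xs => rw [pvFillR, pvMrg, List.filterMap_cons_some (show id (some _) = some _ from rfl), ih]

lemma pvLockLoopA_spec (total : Int) :
    ∀ (lp : List (Int × String)) (d : PySem.Dict Int String) (res : Array (Option String)),
      res.toList = (PySem.List.pyRange 0 total 1).map (fun i => d.get? i) →
      (pvLockLoopA lp res total).toList
        = (PySem.List.pyRange 0 total 1).map
            (fun i => (lp.foldl (fun d p => if 0 ≤ p.1 ∧ p.1 < total then d.insert p.1 p.2 else d) d).get? i) := by
  intro lp
  induction lp with
  | nil => intro d res hres; simpa [pvLockLoopA] using hres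
  | cons p rest ih =>
      intro d res hres
      obtain ⟨pos, uri⟩ := p
      by_cases h : 0 ≤ pos ∧ pos < total
      · rw [pvLockLoopA, if_pos h, List.foldl_cons]
        simp only [if_pos h]
        have hset : ((PySem.List.pyRange 0 total 1).map (fun i => d.get? i)).set pos.toNat (some uri)
            = (PySem.List.pyRange 0 total 1).map (fun i => (d.insert pos uri).get? i) := by
          rw [PySem.List.pyRange_one]
          apply List.ext_getElem
          · simp
          · intro k hk1 hk2
            rw [List.getElem_set]
            simp only [List.getElem_map, List.getElem_range]
            rw [PySem.Dict.get?_insert]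
            by_cases hp : (0 : Int) + (k : Int) = pos
            · have hn : pos.toNat = k := by omega
              rw [if_pos hn, if_pos hp]
            · have hn : ¬ pos.toNat = k := by omega
              rw [if_neg hn, if_neg hp]
        exact ih (d.insert pos uri) _ (by rw [Array.toList_setIfInBounds, hres, hset])
      · rw [pvLockLoopA, if_neg h, List.foldl_cons]
        simp only [if_neg h]
        exact ih d res hres

lemma pvReplicate_eq_map_empty (total : Int) :
    (Array.replicate total.toNat (none : Option String)).toList
      = (PySem.List.pyRange 0 total 1).map (fun i => (PySem.Dict.empty : PySem.Dict Int String).get? i) := by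
  rw [Array.toList_replicate]
  simp only [PySem.Dict.get?_empty]
  rw [List.map_const']
  simp [PySem.List.length_pyRange_one]

lemma pvRange_toNat (total : Int) :
    PySem.List.pyRange 0 ((total.toNat : Nat) : Int) 1 = PySem.List.pyRange 0 total 1 := by
  rw [PySem.List.pyRange_one, PySem.List.pyRange_one]
  have : (((total.toNat : Nat) : Int) - 0).toNat = (total - 0).toNat := by omega
  rw [this]

-- A with locks = pvMrg of the option row with the shuffled fillers
lemma pvA_core (s : List String) (lp : List (Int × String)) (total : Int) (hlp : lp ≠ []) :
    reassemble_with_locks s lp total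
      = pvMrg ((PySem.List.pyRange 0 total 1).map
          (fun i => (lp.foldl (fun d p => if 0 ≤ p.1 ∧ p.1 < total then d.insert p.1 p.2 else d)
              PySem.Dict.empty).get? i)) s := by
  unfold reassemble_with_locks
  rw [if_neg hlp]
  set d := lp.foldl (fun d p => if 0 ≤ p.1 ∧ p.1 < total then d.insert p.1 p.2 else d)
      (PySem.Dict.empty : PySem.Dict Int String) with hd
  have hlock : (pvLockLoopA lp (Array.replicate total.toNat (none : Option String)) total).toList
      = (PySem.List.pyRange 0 total 1).map (fun i => d.get? i) := by
    rw [pvLockLoopA_spec total lp PySem.Dict.empty _ (pvReplicate_eq_map_empty total)]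
  have hlen : ((((PySem.List.pyRange 0 total 1).map (fun i => d.get? i)).length : Nat) : Int)
      = ((total.toNat : Nat) : Int) := by
    simp [PySem.List.length_pyRange_one]
  have hfill := pvFillLoopA_spec s ((PySem.List.pyRange 0 total 1).map (fun i => d.get? i)) []
    (pvLockLoopA lp (Array.replicate total.toNat (none : Option String)) total) 0 (by simpa using hlock)
  simp only [List.length_nil, Nat.cast_zero, zero_add, List.nil_append, List.drop_zero] at hfill
  rw [hlen, pvRange_toNat total] at hfill
  rw [hfill, pvFilterMap_fillR]

-- ----- B-side machinery -----

lemma pvMrg_replicate_append (m : Nat) :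
    ∀ (r : List (Option String)) (s : List String),
      pvMrg (List.replicate m none ++ r) s = s.take m ++ pvMrg r (s.drop m) := by
  induction m with
  | zero => intro r s; simp
  | succ k ih =>
      intro r s
      cases s with
      | nil => simpa [List.replicate_succ, pvMrg] using ih r []
      | cons x xs => simpa [List.replicate_succ, pvMrg] using ih r xs

lemma pvMrg_replicate (m : Nat) (s : List String) :
    pvMrg (List.replicate m none) s = s.take m := by
  have h := pvMrg_replicate_append m [] s
  simpa [pvMrg] using h

lemma pvRow_all_none (d : PySem.Dict Int String) (a b : Int)
    (h : ∀ i, a ≤ i → i < b → d.get? i = none) :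
    (PySem.List.pyRange a b 1).map (fun i => d.get? i) = List.replicate (b - a).toNat none := by
  rw [List.eq_replicate_iff]
  constructor
  · simp [PySem.List.length_pyRange_one]
  · intro o ho
    obtain ⟨i, hi, rfl⟩ := List.mem_map.mp ho
    rw [PySem.List.mem_pyRange_one] at hi
    exact h i hi.1 hi.2

-- keys of the lock dict are within [0, n)
lemma pvBuild_get?_bound (n : Int) :
    ∀ (lp : List (Int × String)) (d : PySem.Dict Int String),
      (∀ k, (d.get? k).isSome → 0 ≤ k ∧ k < n) →
      ∀ k, ((lp.foldl (fun d p => if 0 ≤ p.1 ∧ p.1 < n then d.insert p.1 p.2 else d) d).get? k).isSome →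
        0 ≤ k ∧ k < n := by
  intro lp
  induction lp with
  | nil => intro d hd k hk; exact hd k hk
  | cons p rest ih =>
      intro d hd k hk
      rw [List.foldl_cons] at hk
      by_cases h : 0 ≤ p.1 ∧ p.1 < n
      · rw [if_pos h] at hk
        refine ih (d.insert p.1 p.2) ?_ k hk
        intro k' hk'
        rw [PySem.Dict.get?_insert] at hk'
        by_cases he : k' = p.1
        · exact he ▸ h
        · exact hd k' (by rwa [if_neg he] at hk')
      · rw [if_neg h] at hk
        exact ih d hd k hk

lemma pvBuild_nodup_keys (n : Int) :
    ∀ (lp : List (Int × String)) (d : PySem.Dict Int String),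
      d.keys.Nodup →
      (lp.foldl (fun d p => if 0 ≤ p.1 ∧ p.1 < n then d.insert p.1 p.2 else d) d).keys.Nodup := by
  intro lp
  induction lp with
  | nil => intro d hd; exact hd
  | cons p rest ih =>
      intro d hd
      rw [List.foldl_cons]
      by_cases h : 0 ≤ p.1 ∧ p.1 < n
      · rw [if_pos h]; exact ih _ (PySem.Dict.nodup_keys_insert _ _ _ hd)
      · rw [if_neg h]; exact ih d hd

-- the main correspondence: B's segment loop computes pvMrg of the option row
lemma pvSegLoopB_spec (s : List String) (d : PySem.Dict Int String) (n : Int) :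
    ∀ (ks : List Int) (a j : Int) (out : List String),
      0 ≤ j → j ≤ a → a ≤ n →
      ks.Pairwise (· < ·) →
      (∀ p ∈ ks, a ≤ p ∧ p < n) →
      (∀ i, a ≤ i → i < n → ((d.get? i).isSome ↔ i ∈ ks)) →
      (pvSegLoopB s d ks j (a - j) out).1
        ++ PySem.List.slice s (some ((pvSegLoopB s d ks j (a - j) out).2))
            (some (n - (j + (ks.length : Int))))
      = out ++ pvMrg ((PySem.List.pyRange a n 1).map (fun i => d.get? i)) (s.drop (a - j).toNat) := by
  intro ks
  induction ks with
  | nil =>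
      intro a j out hj hja han _ _ hH
      simp only [pvSegLoopB, List.length_nil, Nat.cast_zero, add_zero]
      have hrow : (PySem.List.pyRange a n 1).map (fun i => d.get? i)
          = List.replicate (n - a).toNat none := by
        refine pvRow_all_none d a n (fun i hi1 hi2 => ?_)
        have h := hH i hi1 hi2
        exact Option.not_isSome_iff_eq_none.mp (fun hs => by cases h.mp hs)
      rw [hrow, pvMrg_replicate]
      rw [PySem.List.slice_toNat s (by omega) (by omega),
        show ((n - j).toNat - (a - j).toNat) = (n - a).toNat by omega]
  | cons p rest ih =>
      intro a j out hj hja han hpw hbnd hH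
      have hp : a ≤ p ∧ p < n := hbnd p (by simp)
      have hpv : (d.get? p).isSome := (hH p hp.1 hp.2).mpr (by simp)
      obtain ⟨v, hv⟩ := Option.isSome_iff_exists.mp hpv
      have hrest_gt : ∀ q ∈ rest, p < q := (List.pairwise_cons.mp hpw).1
      have hih := ih (p + 1) (j + 1)
        (out ++ PySem.List.slice s (some (a - j)) (some (p - j)) ++ [(d.get? p).getD ""])
        (by omega) (by omega) (by omega)
        (List.pairwise_cons.mp hpw).2
        (fun q hq => ⟨by have := hrest_gt q hq; omega, (hbnd q (by simp [hq])).2⟩)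
        (fun i hi1 hi2 => by
          rw [hH i (by omega) hi2]
          simp only [List.mem_cons]
          constructor
          · rintro (rfl | h)
            · omega
            · exact h
          · intro h; exact Or.inr h)
      have hpj : p + 1 - (j + 1) = p - j := by ring
      rw [hpj] at hih
      -- unfold one step of the loop
      have hstep : pvSegLoopB s d (p :: rest) j (a - j) out
          = pvSegLoopB s d rest (j + 1) (p - j)
              (out ++ PySem.List.slice s (some (a - j)) (some (p - j)) ++ [(d.get? p).getD ""]) := rfl
      rw [hstep]
      have hlen : n - (j + ((p :: rest).length : Int)) = n - ((j + 1) + (rest.length : Int)) := by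
        push_cast [List.length_cons]; ring
      rw [hlen, hih]
      -- now decompose the row on the right
      have hsplit : PySem.List.pyRange a n 1
          = PySem.List.pyRange a p 1 ++ p :: PySem.List.pyRange (p + 1) n 1 := by
        rw [PySem.List.pyRange_one_append a p n hp.1 (by omega),
            PySem.List.pyRange_one_cons hp.2]
      have hpre : (PySem.List.pyRange a p 1).map (fun i => d.get? i)
          = List.replicate (p - a).toNat none := by
        refine pvRow_all_none d a p (fun i hi1 hi2 => ?_)
        have hnotin : i ∉ p :: rest := by
          simp only [List.mem_cons, not_or]
          exact ⟨by omega, fun h => by have := hrest_gt i h; omega⟩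
        have h := hH i hi1 (by omega)
        exact Option.not_isSome_iff_eq_none.mp (fun hs => hnotin (h.mp hs))
      rw [hsplit, List.map_append, List.map_cons, hpre, hv]
      rw [pvMrg_replicate_append]
      have hslice : PySem.List.slice s (some (a - j)) (some (p - j))
          = (s.drop (a - j).toNat).take (p - a).toNat := by
        rw [PySem.List.slice_toNat s (by omega) (by omega)]
        congr 1
        omega
      have hdrop : (s.drop (a - j).toNat).drop (p - a).toNat = s.drop (p - j).toNat := by
        rw [List.drop_drop]
        congr 1
        omega
      rw [hslice, hdrop]
      simp [pvMrg, List.append_assoc]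

-- B with locks = pvMrg of the option row with the shuffled fillers
lemma pvB_core (s : List String) (lp : List (Int × String)) (total : Int) (hlp : lp ≠ []) :
    reassemble_with_locks_alt s lp total
      = pvMrg ((PySem.List.pyRange 0 (max total 0) 1).map
          (fun i => (pvBuildLocksB lp (max total 0)).get? i)) s := by
  simp only [reassemble_with_locks_alt, if_neg hlp]
  set n := max total 0 with hn
  set d := pvBuildLocksB lp n with hd
  set ks := PySem.List.sorted d.keys (fun x => x) false with hks
  have hnodupk : d.keys.Nodup := pvBuild_nodup_keys n lp PySem.Dict.empty (by simp [PySem.Dict.keys_empty])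
  have hperm : ks.Perm d.keys := PySem.List.sorted_perm d.keys (fun x => x) false
  have hnodup : ks.Nodup := hperm.nodup_iff.mpr hnodupk
  have hle : ks.Pairwise (fun a b => (fun x => x) a ≤ (fun x => x) b) :=
    PySem.List.sorted_pairwise d.keys (fun x => x)
  have hpw : ks.Pairwise (· < ·) := by
    have h2 : ks.Pairwise (· ≠ ·) := hnodup
    exact (hle.and h2).imp (fun {a b} h => lt_of_le_of_ne h.1 h.2)
  have hmemks : ∀ i, i ∈ ks ↔ (d.get? i).isSome := by
    intro i
    rw [hperm.mem_iff, ← PySem.Dict.contains_iff_mem_keys, PySem.Dict.contains_eq_isSome_get?]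
  have hbnd : ∀ p ∈ ks, (0 : Int) ≤ p ∧ p < n := by
    intro p hp
    exact pvBuild_get?_bound n lp PySem.Dict.empty
      (by intro k hk; simp [PySem.Dict.get?_empty] at hk) p ((hmemks p).mp hp)
  have hH : ∀ i, (0 : Int) ≤ i → i < n → ((d.get? i).isSome ↔ i ∈ ks) :=
    fun i _ _ => (hmemks i).symm
  have hmain := pvSegLoopB_spec s d n ks 0 0 [] (by omega) (by omega) (by omega) hpw hbnd hH
  have hlenk : (d.keys.length : Int) = (ks.length : Int) := by
    rw [hperm.length_eq]
  simp only [sub_zero, zero_add, Int.toNat_zero, List.drop_zero, List.nil_append] at hmain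
  rw [hlenk]
  exact hmain

-- the two lock dicts coincide (0 ≤ p < total ↔ 0 ≤ p < max total 0)
lemma pvDicts_eq (lp : List (Int × String)) (total : Int) :
    lp.foldl (fun d p => if 0 ≤ p.1 ∧ p.1 < total then d.insert p.1 p.2 else d)
        (PySem.Dict.empty : PySem.Dict Int String)
      = pvBuildLocksB lp (max total 0) := by
  unfold pvBuildLocksB
  congr 1
  funext d p
  exact if_congr (by constructor <;> (intro h; exact ⟨h.1, by omega⟩)) rfl rfl

lemma pvRange_max (total : Int) :
    PySem.List.pyRange 0 total 1 = PySem.List.pyRange 0 (max total 0) 1 := by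
  by_cases h : 0 ≤ total
  · rw [max_eq_left h]
  · rw [PySem.List.pyRange_one_eq_nil (by omega), PySem.List.pyRange_one_eq_nil (by omega)]

-- ===== VERDICT (by name: the statement is the Claim_ definition above) =====
theorem reassemble_with_locks_spec : Claim_equal_reassemble_with_locks := by
  intro s lp total _
  unfold Spec_reassemble_with_locks
  by_cases hlp : lp = []
  · simp [reassemble_with_locks, reassemble_with_locks_alt, hlp]
  · rw [pvA_core s lp total hlp, pvB_core s lp total hlp, pvRange_max, pvDicts_eq]
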